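-- pv_equiv track=rewrite | github.com/d04943016/ColorScience | ReaderWriter/Reader/tagline.py | GroupSelect
-- ===== SOURCE A (Python) =====
-- def GroupSelect(GroupCheckBool):
--     """
--     GroupSelect is a function to select the all True group in GroupCheckBool.
--     If there are more than one group is all True, choose the group with more
--     Trues. Or choose the first all True group if the number of True are the
--     same. If there is no group is all True, return -1
--
--     """
--
--     groupNumber = -1
--     for i,checkBool in enumerate(GroupCheckBool):
--         if len(checkBool) == sum(checkBool): # check all correct
--             if groupNumber == -1:
--                 groupNumber = i
--             elif len(checkBool) > len(GroupCheckBool[groupNumber]):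
--                 groupNumber = i
--     return groupNumber
-- ===== SOURCE B (Python) =====
-- def GroupSelect(GroupCheckBool):
--     # Score each group: its length if all-True (len == sum), else -1.
--     sizes = [len(c) if len(c) == sum(c) else -1 for c in GroupCheckBool]
--     best = max(sizes, default=-1)
--     return -1 if best < 0 else sizes.index(best)
-- ===== Notes on version B (the rewrite author's own statement) =====
-- stated objective: simpler
-- what changed: Replaces A's single interleaved tracking loop (best-index accumulator, -1 sentinel, re-indexing GroupCheckBool[groupNumber]) with an argmax-via-scores scheme: map every group to a numeric score (its length if all-True, else -1), take max of the score list, and recover the answer as the position of the first occurrence of that maximum via list.index; no index tracking or pairs at all.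
import Mathlib
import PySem

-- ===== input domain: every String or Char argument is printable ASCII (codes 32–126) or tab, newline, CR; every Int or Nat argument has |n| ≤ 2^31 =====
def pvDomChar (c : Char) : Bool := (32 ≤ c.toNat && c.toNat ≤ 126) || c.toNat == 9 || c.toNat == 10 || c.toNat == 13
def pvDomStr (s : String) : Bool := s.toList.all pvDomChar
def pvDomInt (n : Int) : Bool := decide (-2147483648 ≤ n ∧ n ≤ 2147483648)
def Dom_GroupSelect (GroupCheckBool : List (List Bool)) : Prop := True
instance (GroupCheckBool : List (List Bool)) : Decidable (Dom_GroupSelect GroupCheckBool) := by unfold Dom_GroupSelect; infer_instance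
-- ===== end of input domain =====

-- B replaces A's interleaved best-index tracking loop with an argmax-via-scores
-- scheme: map each group to a score, take max, then look up its first position
-- (objective: simpler).

-- ===== PORT A =====
def GroupSelect (GroupCheckBool : List (List Bool)) : Int :=
  (PySem.List.enumerate GroupCheckBool 0).foldl
    (fun groupNumber p =>
      if (p.2.length : Int) = (p.2.map (fun b => if b then (1 : Int) else 0)).sum then
        if groupNumber = -1 then p.1
        else if (p.2.length : Int) >
            (((PySem.List.pyGet? GroupCheckBool groupNumber).getD []).length : Int) then p.1
        else groupNumber
      else groupNumber)
    (-1)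

-- ===== PORT B =====
def GroupSelect_alt (GroupCheckBool : List (List Bool)) : Int :=
  let sizes : List Int := GroupCheckBool.map
    (fun c => if (c.length : Int) = (c.map (fun b => if b then (1 : Int) else 0)).sum
              then (c.length : Int) else -1)
  let best : Int := (PySem.List.max? sizes (fun x => x)).getD (-1)
  if best < 0 then -1
  else match PySem.List.index? sizes best with
       | some k => (k : Int)
       | none => -1   -- unreachable: best ≥ 0 is an element of sizes, so .index never raises

-- ===== PRECONDITION & SPEC =====
def Spec_GroupSelect (GroupCheckBool : List (List Bool)) (out : Int) : Prop := out = GroupSelect_alt GroupCheckBool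
instance (GroupCheckBool : List (List Bool)) (out : Int) : Decidable (Spec_GroupSelect GroupCheckBool out) := by unfold Spec_GroupSelect; infer_instance

-- ===== CLAIM =====
def Claim_equal_GroupSelect : Prop := ∀ (GroupCheckBool : List (List Bool)), Dom_GroupSelect GroupCheckBool → Spec_GroupSelect GroupCheckBool (GroupSelect GroupCheckBool)

-- ===== LEMMAS AND PROOFS =====

-- A's loop step, the first-maximal reduction step, and the candidate test
def pvStepA (g : List (List Bool)) (groupNumber : Int) (p : Int × List Bool) : Int :=
  if (p.2.length : Int) = (p.2.map (fun b => if b then (1 : Int) else 0)).sum then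
    if groupNumber = -1 then p.1
    else if (p.2.length : Int) >
        (((PySem.List.pyGet? g groupNumber).getD []).length : Int) then p.1
    else groupNumber
  else groupNumber

def pvStepB (best p : Int × List Bool) : Int × List Bool :=
  if best.2.length < p.2.length then p else best

def pvCand (p : Int × List Bool) : Bool :=
  (p.2.length : Int) == (p.2.map (fun b => if b then (1 : Int) else 0)).sum

def pvF : List (Int × List Bool) → Int
  | [] => -1
  | p0 :: rest => (rest.foldl pvStepB p0).1

-- B-side abstractions: the score of one group, the best score, the first index with a score
def pvScore (c : List Bool) : Int :=
  if (c.length : Int) = (c.map (fun b => if b then (1 : Int) else 0)).sum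
  then (c.length : Int) else -1

def pvBest : List (List Bool) → Int
  | [] => -1
  | c :: t => max (pvScore c) (pvBest t)

def pvFirstAt : List (List Bool) → Int → Nat
  | [], _ => 0
  | c :: t, v => if pvScore c = v then 0 else pvFirstAt t v + 1

theorem pvBest_cons (c : List Bool) (t : List (List Bool)) :
    pvBest (c :: t) = max (pvScore c) (pvBest t) := rfl

theorem pvScore_ge (c : List Bool) : -1 ≤ pvScore c := by
  unfold pvScore; split_ifs <;> omega

theorem pvBest_ge (t : List (List Bool)) : -1 ≤ pvBest t := by
  induction t with
  | nil => simp [pvBest]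
  | cons c t ih => rw [pvBest_cons]; omega

-- folding A's step over the candidates only, starting from a valid candidate b,
-- equals the first-maximal reduction
theorem pvKey (g : List (List Bool)) :
    ∀ (l : List (Int × List Bool)) (b : Int × List Bool),
      (∀ p ∈ l, PySem.List.pyGet? g p.1 = some p.2 ∧ 0 ≤ p.1) →
      PySem.List.pyGet? g b.1 = some b.2 → 0 ≤ b.1 →
      l.foldl (pvStepA g) b.1 = ((l.filter pvCand).foldl pvStepB b).1 := by
  intro l
  induction l with
  | nil => intro b _ _ _; simp
  | cons p t ih =>
    intro b hmem hb hb0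
    have hp := hmem p (by simp)
    by_cases hc : (p.2.length : Int) = (p.2.map (fun b => if b then (1 : Int) else 0)).sum
    · have hfil : (p :: t).filter pvCand = p :: t.filter pvCand := by
        simp [pvCand, hc]
      rw [hfil]
      have hne : b.1 ≠ -1 := by omega
      by_cases hgt : (p.2.length : Int) > (b.2.length : Int)
      · have hA : pvStepA g b.1 p = p.1 := by
          simp [pvStepA, hc, hne, hb]; omega
        have hB : pvStepB b p = p := by
          simp [pvStepB]; omega
        simp only [List.foldl_cons, hA, hB]
        exact ih p (fun q hq => hmem q (by simp [hq])) hp.1 hp.2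
      · have hA : pvStepA g b.1 p = b.1 := by
          simp [pvStepA, hc, hne, hb]; omega
        have hB : pvStepB b p = b := by
          simp [pvStepB]; omega
        simp only [List.foldl_cons, hA, hB]
        exact ih b (fun q hq => hmem q (by simp [hq])) hb hb0
    · have hfil : (p :: t).filter pvCand = t.filter pvCand := by
        simp [pvCand, hc]
      have hA : pvStepA g b.1 p = b.1 := by simp [pvStepA, hc]
      rw [hfil]
      simp only [List.foldl_cons, hA]
      exact ih b (fun q hq => hmem q (by simp [hq])) hb hb0

theorem pvTop (g : List (List Bool)) :
    ∀ (l : List (Int × List Bool)),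
      (∀ p ∈ l, PySem.List.pyGet? g p.1 = some p.2 ∧ 0 ≤ p.1) →
      l.foldl (pvStepA g) (-1) = pvF (l.filter pvCand) := by
  intro l
  induction l with
  | nil => intro _; simp [pvF]
  | cons p t ih =>
    intro hmem
    have hp := hmem p (by simp)
    by_cases hc : (p.2.length : Int) = (p.2.map (fun b => if b then (1 : Int) else 0)).sum
    · have hfil : (p :: t).filter pvCand = p :: t.filter pvCand := by
        simp [pvCand, hc]
      have hA : pvStepA g (-1) p = p.1 := by simp [pvStepA, hc]
      rw [hfil]
      simp only [List.foldl_cons, hA, pvF]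
      exact pvKey g t p (fun q hq => hmem q (by simp [hq])) hp.1 hp.2
    · have hfil : (p :: t).filter pvCand = t.filter pvCand := by
        simp [pvCand, hc]
      have hA : pvStepA g (-1) p = -1 := by simp [pvStepA, hc]
      rw [hfil]
      simp only [List.foldl_cons, hA]
      exact ih (fun q hq => hmem q (by simp [hq]))

theorem pvEnumMem (g : List (List Bool)) :
    ∀ p ∈ PySem.List.enumerate g 0, PySem.List.pyGet? g p.1 = some p.2 ∧ 0 ≤ p.1 := by
  intro p hp
  rw [PySem.List.mem_enumerate_iff] at hp
  obtain ⟨k, hk, rfl⟩ := hp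
  constructor
  · simp [hk]
  · simp

-- the first-maximal reduction over the candidate pairs, characterized by pvBest / pvFirstAt
theorem pvFoldB_char :
    ∀ (t : List (List Bool)) (n j : Int) (cb : List Bool),
      (((PySem.List.enumerate t n).filter pvCand).foldl pvStepB (j, cb)).1 =
        if pvBest t ≤ (cb.length : Int) then j
        else n + (pvFirstAt t (pvBest t) : Int) := by
  intro t
  induction t with
  | nil =>
    intro n j cb
    have h : pvBest ([] : List (List Bool)) ≤ (cb.length : Int) := by
      simp only [pvBest]; omega
    rw [PySem.List.enumerate_nil]
    simp only [List.filter_nil, List.foldl_nil, if_pos h]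
  | cons c t ih =>
    intro n j cb
    rw [PySem.List.enumerate_cons]
    by_cases hc : (c.length : Int) = (c.map (fun b => if b then (1 : Int) else 0)).sum
    · have hs : pvScore c = (c.length : Int) := by simp [pvScore, hc]
      have hfil : ((n, c) :: PySem.List.enumerate t (n + 1)).filter pvCand
          = (n, c) :: (PySem.List.enumerate t (n + 1)).filter pvCand := by
        simp [pvCand, hc]
      rw [hfil, List.foldl_cons]
      by_cases hgt : cb.length < c.length
      · have hB : pvStepB (j, cb) (n, c) = (n, c) := by simp [pvStepB, hgt]
        rw [hB, ih (n + 1) n c]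
        by_cases h2 : pvBest t ≤ (c.length : Int)
        · rw [if_pos h2]
          have hmax : pvBest (c :: t) = (c.length : Int) := by
            rw [pvBest_cons, hs]; omega
          have hnc : ¬ pvBest (c :: t) ≤ (cb.length : Int) := by rw [hmax]; omega
          rw [if_neg hnc, hmax]
          have hf0 : pvFirstAt (c :: t) (c.length : Int) = 0 := by
            simp [pvFirstAt, hs]
          rw [hf0]; simp
        · rw [if_neg h2]
          have hmax : pvBest (c :: t) = pvBest t := by rw [pvBest_cons, hs]; omega
          have hnc : ¬ pvBest (c :: t) ≤ (cb.length : Int) := by rw [hmax]; omega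
          rw [if_neg hnc, hmax]
          have hne : pvScore c ≠ pvBest t := by rw [hs]; omega
          have hf : pvFirstAt (c :: t) (pvBest t) = pvFirstAt t (pvBest t) + 1 := by
            simp [pvFirstAt, hne]
          rw [hf]; push_cast; ring
      · have hB : pvStepB (j, cb) (n, c) = (j, cb) := by simp [pvStepB, hgt]
        rw [hB, ih (n + 1) j cb]
        by_cases h2 : pvBest t ≤ (cb.length : Int)
        · have hle : pvBest (c :: t) ≤ (cb.length : Int) := by
            rw [pvBest_cons, hs]; omega
          rw [if_pos h2, if_pos hle]
        · have hmax : pvBest (c :: t) = pvBest t := by rw [pvBest_cons, hs]; omega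
          have hnc : ¬ pvBest (c :: t) ≤ (cb.length : Int) := by rw [hmax]; omega
          rw [if_neg h2, if_neg hnc, hmax]
          have hne : pvScore c ≠ pvBest t := by rw [hs]; omega
          have hf : pvFirstAt (c :: t) (pvBest t) = pvFirstAt t (pvBest t) + 1 := by
            simp [pvFirstAt, hne]
          rw [hf]; push_cast; ring
    · have hs : pvScore c = -1 := by simp [pvScore, hc]
      have hfil : ((n, c) :: PySem.List.enumerate t (n + 1)).filter pvCand
          = (PySem.List.enumerate t (n + 1)).filter pvCand := by
        simp [pvCand, hc]
      rw [hfil, ih (n + 1) j cb]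
      have hge := pvBest_ge t
      have hmax : pvBest (c :: t) = pvBest t := by rw [pvBest_cons, hs]; omega
      rw [hmax]
      by_cases h2 : pvBest t ≤ (cb.length : Int)
      · rw [if_pos h2, if_pos h2]
      · rw [if_neg h2, if_neg h2]
        have hne : pvScore c ≠ pvBest t := by rw [hs]; omega
        have hf : pvFirstAt (c :: t) (pvBest t) = pvFirstAt t (pvBest t) + 1 := by
          simp [pvFirstAt, hne]
        rw [hf]; push_cast; ring

-- A's value (as pvF over the candidates), characterized by pvBest / pvFirstAt
theorem pvA_char :
    ∀ (t : List (List Bool)) (n : Int),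
      pvF ((PySem.List.enumerate t n).filter pvCand) =
        if pvBest t < 0 then -1 else n + (pvFirstAt t (pvBest t) : Int) := by
  intro t
  induction t with
  | nil =>
    intro n
    rw [PySem.List.enumerate_nil]
    have h : pvBest ([] : List (List Bool)) < 0 := by simp [pvBest]
    simp only [List.filter_nil, pvF, if_pos h]
  | cons c t ih =>
    intro n
    rw [PySem.List.enumerate_cons]
    by_cases hc : (c.length : Int) = (c.map (fun b => if b then (1 : Int) else 0)).sum
    · have hs : pvScore c = (c.length : Int) := by simp [pvScore, hc]
      have hfil : ((n, c) :: PySem.List.enumerate t (n + 1)).filter pvCand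
          = (n, c) :: (PySem.List.enumerate t (n + 1)).filter pvCand := by
        simp [pvCand, hc]
      rw [hfil]
      simp only [pvF]
      rw [pvFoldB_char t (n + 1) n c]
      have hnb : ¬ pvBest (c :: t) < 0 := by rw [pvBest_cons, hs]; omega
      rw [if_neg hnb]
      by_cases h2 : pvBest t ≤ (c.length : Int)
      · rw [if_pos h2]
        have hmax : pvBest (c :: t) = (c.length : Int) := by rw [pvBest_cons, hs]; omega
        rw [hmax]
        have hf0 : pvFirstAt (c :: t) (c.length : Int) = 0 := by simp [pvFirstAt, hs]
        rw [hf0]; simp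
      · rw [if_neg h2]
        have hmax : pvBest (c :: t) = pvBest t := by rw [pvBest_cons, hs]; omega
        rw [hmax]
        have hne : pvScore c ≠ pvBest t := by rw [hs]; omega
        have hf : pvFirstAt (c :: t) (pvBest t) = pvFirstAt t (pvBest t) + 1 := by
          simp [pvFirstAt, hne]
        rw [hf]; push_cast; ring
    · have hs : pvScore c = -1 := by simp [pvScore, hc]
      have hfil : ((n, c) :: PySem.List.enumerate t (n + 1)).filter pvCand
          = (PySem.List.enumerate t (n + 1)).filter pvCand := by
        simp [pvCand, hc]
      rw [hfil, ih (n + 1)]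
      have hge := pvBest_ge t
      have hmax : pvBest (c :: t) = pvBest t := by rw [pvBest_cons, hs]; omega
      rw [hmax]
      by_cases h2 : pvBest t < 0
      · rw [if_pos h2, if_pos h2]
      · rw [if_neg h2, if_neg h2]
        have hne : pvScore c ≠ pvBest t := by rw [hs]; omega
        have hf : pvFirstAt (c :: t) (pvBest t) = pvFirstAt t (pvBest t) + 1 := by
          simp [pvFirstAt, hne]
        rw [hf]; push_cast; ring

-- B-side: max of the score list is pvBest
theorem pvFoldlMax (t : List (List Bool)) : ∀ (x : Int), -1 ≤ x →
    (t.map pvScore).foldl max x = max x (pvBest t) := by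
  induction t with
  | nil => intro x hx; simp [pvBest]; omega
  | cons c t ih =>
    intro x hx
    rw [List.map_cons, List.foldl_cons, ih (max x (pvScore c)) (by omega), pvBest_cons]
    omega

theorem pvMax_eq (g : List (List Bool)) :
    (PySem.List.max? (g.map pvScore) (fun x => x)).getD (-1) = pvBest g := by
  cases g with
  | nil => simp [PySem.List.max?, pvBest]
  | cons c t =>
    rw [List.map_cons, PySem.List.max?_id_cons]
    simp only [Option.getD_some, pvBest_cons]
    rw [pvFoldlMax t (pvScore c) (pvScore_ge c)]

-- B-side: index of the first occurrence of a present score is pvFirstAt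
theorem pvIdx_eq (g : List (List Bool)) (v : Int) (hmem : v ∈ g.map pvScore) :
    PySem.List.index? (g.map pvScore) v = some (pvFirstAt g v) := by
  induction g with
  | nil => simp at hmem
  | cons c t ih =>
    rw [List.map_cons]
    by_cases h : pvScore c = v
    · rw [h, PySem.List.index?_cons_self]
      simp [pvFirstAt, h]
    · rw [PySem.List.index?_cons_of_ne _ h]
      have hmem' : v ∈ t.map pvScore := by
        rcases List.mem_cons.mp hmem with h' | h'
        · exact absurd h'.symm h
        · exact h'
      rw [ih hmem']
      simp [pvFirstAt, h]

theorem pvBest_mem (g : List (List Bool)) (h : 0 ≤ pvBest g) :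
    pvBest g ∈ g.map pvScore := by
  induction g with
  | nil => simp [pvBest] at h
  | cons c t ih =>
    rw [pvBest_cons] at h ⊢
    by_cases h' : pvBest t ≤ pvScore c
    · rw [max_eq_left h']; simp
    · rw [max_eq_right (le_of_not_ge h')]
      exact List.mem_cons_of_mem _ (ih (by omega))

-- ===== VERDICT =====
theorem GroupSelect_spec : Claim_equal_GroupSelect := by
  intro g _
  unfold Spec_GroupSelect
  have hA : GroupSelect g = if pvBest g < 0 then -1 else 0 + (pvFirstAt g (pvBest g) : Int) := by
    show (PySem.List.enumerate g 0).foldl (pvStepA g) (-1) = _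
    rw [pvTop g _ (pvEnumMem g), pvA_char g 0]
  have hB : GroupSelect_alt g = if pvBest g < 0 then -1 else (pvFirstAt g (pvBest g) : Int) := by
    show (if (PySem.List.max? (g.map pvScore) (fun x => x)).getD (-1) < 0 then (-1 : Int)
          else match PySem.List.index? (g.map pvScore)
                 ((PySem.List.max? (g.map pvScore) (fun x => x)).getD (-1)) with
               | some k => (k : Int)
               | none => -1) = _
    rw [pvMax_eq]
    by_cases h : pvBest g < 0
    · rw [if_pos h, if_pos h]
    · rw [if_neg h, if_neg h, pvIdx_eq g (pvBest g) (pvBest_mem g (by omega))]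
  rw [hA, hB]
  by_cases h : pvBest g < 0
  · rw [if_pos h, if_pos h]
  · rw [if_neg h, if_neg h]; omega
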